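-- pv_equiv track=rewrite | github.com/cartertate12/BibleNameAnalysis | bibleAnalysisFunctions.py | GetVerseReferences
-- ===== SOURCE A (Python) =====
-- def GetVerseReferences(verseReferenceListing):
--     '''Given a book, chapter, verse listing, return three lists that contain those elements broken out in that order.'''
--
--     verseReferenceListing = [ele[::-1] for ele in verseReferenceListing]
--
--     verses = []
--     chapters = []
--     books = []
--
--     for ele in verseReferenceListing:
--         temp_list_1 = ele.split(':')
--         verses.append(temp_list_1[0][::-1])
--         temp_list_2 = temp_list_1[1].split(' ',1)
--         chapters.append(temp_list_2[0][::-1])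
--         books.append(temp_list_2[1][::-1])
--
--     return books, chapters, verses
-- ===== SOURCE B (Python) =====
-- def GetVerseReferences(verseReferenceListing):
--     '''Given a book, chapter, verse listing, return three lists that contain those elements broken out in that order.'''
--     triples = []
--     for ele in verseReferenceListing:
--         q = ele.split(':')
--         verse = q[-1]
--         parts = q[-2].rsplit(' ', 1)
--         triples.append((parts[0], parts[1], verse))
--     if not triples:
--         return [], [], []
--     books, chapters, verses = (list(t) for t in zip(*triples))
--     return books, chapters, verses
-- ===== Notes on version B (the rewrite author's own statement) =====
-- stated objective: simpler
-- what changed: B drops A's reverse-every-string trick and three parallel accumulator lists: it parses each reference forward with split(':')/rsplit(' ',1), collects (book, chapter, verse) triples in one list and transposes with zip(*triples) at the end.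
import Mathlib
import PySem

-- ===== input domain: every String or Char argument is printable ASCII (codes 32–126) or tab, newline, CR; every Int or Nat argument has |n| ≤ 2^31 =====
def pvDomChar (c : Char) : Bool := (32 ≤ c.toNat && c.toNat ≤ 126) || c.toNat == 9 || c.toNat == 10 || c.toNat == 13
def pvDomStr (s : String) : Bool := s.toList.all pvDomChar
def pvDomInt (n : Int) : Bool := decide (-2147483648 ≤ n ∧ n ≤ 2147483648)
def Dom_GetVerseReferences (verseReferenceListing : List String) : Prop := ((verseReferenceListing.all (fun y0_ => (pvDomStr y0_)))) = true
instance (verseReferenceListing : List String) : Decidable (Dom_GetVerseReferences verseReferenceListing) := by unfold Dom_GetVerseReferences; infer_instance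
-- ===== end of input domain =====

-- B replaces A's reverse-everything-then-split parallel-accumulator loop by forward
-- splits (split / rsplit) collected as one list of triples that is transposed at the end
-- (objective: simpler).

-- ===== PORT A =====
-- A raises IndexError where a reference has no ':' or no ' ' in the segment before its
-- last ':'; the port returns "" there via .getD (those inputs are excluded by Pre_).
-- ele[::-1] is ported as toList.reverse (PySem.Str.slice?_none_none_neg_one).
def pvStepA (acc : List String × List String × List String) (ele : String) :
    List String × List String × List String :=
  let (verses, chapters, books) := acc
  let temp_list_1 := PySem.Chars.splitOn ele.toList [':']
  let verses := verses ++ [String.ofList (((PySem.List.pyGet? temp_list_1 0).getD []).reverse)]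
  let temp_list_2 := PySem.Chars.splitOnMax ((PySem.List.pyGet? temp_list_1 1).getD []) [' '] 1
  let chapters := chapters ++ [String.ofList (((PySem.List.pyGet? temp_list_2 0).getD []).reverse)]
  let books := books ++ [String.ofList (((PySem.List.pyGet? temp_list_2 1).getD []).reverse)]
  (verses, chapters, books)

def GetVerseReferences (verseReferenceListing : List String) :
    List String × List String × List String :=
  let verseReferenceListing := verseReferenceListing.map (fun ele => String.ofList ele.toList.reverse)
  let r := verseReferenceListing.foldl pvStepA ([], [], [])
  (r.2.2, r.2.1, r.1)

-- ===== PORT B =====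
-- s.rsplit(' ', 1) ported by hand (PySem has no rsplit): split at the LAST occurrence of
-- the one-character separator; exact for a 1-char sep and maxsplit=1.
def pvRsplit1 (cs : List Char) (sep : Char) : List (List Char) :=
  let r := cs.reverse
  let a := r.takeWhile (fun x => x ≠ sep)
  if a.length = r.length then [cs]
  else [(r.drop (a.length + 1)).reverse, a.reverse]

def pvStepB (acc : List (String × String × String)) (ele : String) :
    List (String × String × String) :=
  let q := PySem.Chars.splitOn ele.toList [':']
  let verse := (PySem.List.pyGet? q (-1)).getD []
  let parts := pvRsplit1 ((PySem.List.pyGet? q (-2)).getD []) ' '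
  acc ++ [(String.ofList ((PySem.List.pyGet? parts 0).getD []),
           String.ofList ((PySem.List.pyGet? parts 1).getD []),
           String.ofList verse)]

def GetVerseReferences_alt (verseReferenceListing : List String) :
    List String × List String × List String :=
  let triples := verseReferenceListing.foldl pvStepB []
  -- zip(*triples) with the empty-input guard: transposing the triple list
  (triples.map (fun t => t.1), triples.map (fun t => t.2.1), triples.map (fun t => t.2.2))

-- ===== PRECONDITION & SPEC =====
-- Pre_ excludes exactly the inputs on which A raises IndexError: a reference with no ':'
-- (the split has fewer than two pieces) or whose piece before the last ':' has no ' '.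
def Pre_GetVerseReferences (verseReferenceListing : List String) : Prop :=
  ∀ s ∈ verseReferenceListing,
    2 ≤ (PySem.Chars.splitOn s.toList [':']).length ∧
    ' ' ∈ (PySem.List.pyGet? (PySem.Chars.splitOn s.toList [':']) (-2)).getD []
instance (verseReferenceListing : List String) : Decidable (Pre_GetVerseReferences verseReferenceListing) := by unfold Pre_GetVerseReferences; infer_instance

def pvWitness_GetVerseReferences : List String := ["Genesis 1:1", "1 John 3:16"]

def Spec_GetVerseReferences (verseReferenceListing : List String) (out : List String × List String × List String) : Prop := out = GetVerseReferences_alt verseReferenceListing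
instance (verseReferenceListing : List String) (out : List String × List String × List String) : Decidable (Spec_GetVerseReferences verseReferenceListing out) := by unfold Spec_GetVerseReferences; infer_instance

-- ===== CLAIM (what is proved, stated in full; the proofs are below) =====
def Claim_equal_GetVerseReferences : Prop := ∀ (verseReferenceListing : List String), Dom_GetVerseReferences verseReferenceListing → Pre_GetVerseReferences verseReferenceListing → Spec_GetVerseReferences verseReferenceListing (GetVerseReferences verseReferenceListing)

-- ===== LEMMAS AND PROOFS =====

-- A simple structural model of s.split(c) for a one-character separator.
def pvConsHead (a : Char) : List (List Char) → List (List Char)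
  | [] => [[a]]
  | x :: xs => (a :: x) :: xs

def pvSplit (c : Char) : List Char → List (List Char)
  | [] => [[]]
  | a :: t => if a = c then [] :: pvSplit c t else pvConsHead a (pvSplit c t)

def pvGlueHead (p : List Char) : List (List Char) → List (List Char)
  | [] => [p]
  | x :: xs => (p ++ x) :: xs

lemma pvSplit_ne_nil (c : Char) (l : List Char) : pvSplit c l ≠ [] := by
  cases l with
  | nil => simp [pvSplit]
  | cons a t =>
    simp only [pvSplit]
    split
    · simp
    · cases h : pvSplit c t <;> simp [pvConsHead]

lemma splitOn_go_eq (c : Char) (fuel : Nat) (l cur : List Char) (acc : List (List Char))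
    (h : l.length < fuel) :
    PySem.Chars.splitOn.go [c] fuel l cur acc = acc.reverse ++ pvGlueHead cur.reverse (pvSplit c l) := by
  induction fuel generalizing l cur acc with
  | zero => omega
  | succ f ih =>
    cases l with
    | nil =>
      rw [PySem.Chars.splitOn.go]
      · simp [pvSplit, pvGlueHead]
      · omega
    | cons a t =>
      rw [PySem.Chars.splitOn.go]
      by_cases hac : a = c
      · subst hac
        have hp : List.isPrefixOf [a] (a :: t) = true := by simp [List.isPrefixOf]
        simp only [hp, if_true]
        simp only [show List.drop [a].length (a :: t) = t from rfl]
        rw [ih t [] ((List.reverse cur) :: acc) (by simp at h; omega)]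
        simp [pvSplit]
        cases hq : pvSplit a t with
        | nil => exact absurd hq (pvSplit_ne_nil a t)
        | cons x xs => simp [pvGlueHead]
      · have hp : List.isPrefixOf [c] (a :: t) = false := by
          simp [List.isPrefixOf]; exact fun hh => absurd hh.symm hac
        simp only [hp, Bool.false_eq_true, if_false]
        rw [ih t (a :: cur) acc (by simp at h; omega)]
        simp only [pvSplit, if_neg hac]
        cases hq : pvSplit c t with
        | nil => exact absurd hq (pvSplit_ne_nil c t)
        | cons x xs => simp [pvGlueHead, pvConsHead]

lemma splitOn_eq_pvSplit (c : Char) (l : List Char) :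
    PySem.Chars.splitOn l [c] = pvSplit c l := by
  rw [PySem.Chars.splitOn, splitOn_go_eq c (l.length+1) l [] [] (by omega)]
  cases hq : pvSplit c l with
  | nil => exact absurd hq (pvSplit_ne_nil c l)
  | cons x xs => simp [pvGlueHead]

-- A model of s.split(c, 1): split at the FIRST occurrence of c.
def pvFirstSplit (c : Char) (p l : List Char) : List (List Char) :=
  if c ∈ l then [p ++ l.takeWhile (fun x => x ≠ c), (l.dropWhile (fun x => x ≠ c)).tail]
  else [p ++ l]

lemma splitOnMax_go_zero (c : Char) (fuel : Nat) (l cur : List Char) (acc : List (List Char)) :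
    PySem.Chars.splitOnMax.go [c] fuel 0 l cur acc = acc.reverse ++ [cur.reverse ++ l] := by
  cases fuel with
  | zero => rw [PySem.Chars.splitOnMax.go]; simp
  | succ f =>
    cases l with
    | nil =>
      rw [PySem.Chars.splitOnMax.go]
      · simp
      · omega
    | cons a t =>
      rw [PySem.Chars.splitOnMax.go]
      simp

lemma splitOnMax_go_one (c : Char) (fuel : Nat) (l cur : List Char) (acc : List (List Char))
    (h : l.length < fuel) :
    PySem.Chars.splitOnMax.go [c] fuel 1 l cur acc = acc.reverse ++ pvFirstSplit c cur.reverse l := by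
  induction fuel generalizing l cur acc with
  | zero => omega
  | succ f ih =>
    cases l with
    | nil =>
      rw [PySem.Chars.splitOnMax.go]
      · simp [pvFirstSplit]
      · omega
    | cons a t =>
      rw [PySem.Chars.splitOnMax.go]
      rw [if_neg (show ¬(1:Nat) = 0 by omega)]
      by_cases hac : a = c
      · subst hac
        have hp : List.isPrefixOf [a] (a :: t) = true := by simp [List.isPrefixOf]
        simp only [hp, if_true]
        simp only [show List.drop [a].length (a :: t) = t from rfl, show (1:Nat) - 1 = 0 from rfl]
        rw [splitOnMax_go_zero]
        simp [pvFirstSplit]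
      · have hp : List.isPrefixOf [c] (a :: t) = false := by
          simp [List.isPrefixOf]; exact fun hh => absurd hh.symm hac
        simp only [hp, Bool.false_eq_true, if_false]
        rw [ih t (a :: cur) acc (by simp at h; omega)]
        have hca : ¬ c = a := fun hh => absurd hh.symm hac
        simp only [pvFirstSplit, List.mem_cons, List.takeWhile_cons, List.dropWhile_cons,
          hca, false_or, decide_eq_true_eq]
        rw [if_pos hac, List.reverse_cons]
        split <;> simp

lemma splitOnMax_one_eq (c : Char) (l : List Char) :
    PySem.Chars.splitOnMax l [c] 1 = pvFirstSplit c [] l := by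
  rw [PySem.Chars.splitOnMax]
  simp only [show ¬((1:Int) < 0) by omega, if_false, Int.toNat_one]
  rw [splitOnMax_go_one c (l.length+1) l [] [] (by omega)]
  simp

-- Reversing the string reverses the split (each piece reversed, pieces in reverse order).
def pvModLast (a : Char) : List (List Char) → List (List Char)
  | [] => [[a]]
  | [x] => [x ++ [a]]
  | x :: y :: xs => x :: pvModLast a (y :: xs)

lemma pvModLast_append (a : Char) (ys : List (List Char)) (z : List Char) :
    pvModLast a (ys ++ [z]) = ys ++ [z ++ [a]] := by
  induction ys with
  | nil => simp [pvModLast]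
  | cons y ys ih =>
    cases hys : ys ++ [z] with
    | nil => simp at hys
    | cons b bs =>
      simp only [List.cons_append, hys, pvModLast]
      rw [← hys, ih]

lemma pvConsHead_append_nil (x : Char) (m : List (List Char)) (hm : m ≠ []) :
    pvConsHead x (m ++ [[]]) = pvConsHead x m ++ [[]] := by
  cases m with
  | nil => exact absurd rfl hm
  | cons y ys => simp [pvConsHead]

lemma pvConsHead_modLast (x a : Char) (m : List (List Char)) (hm : m ≠ []) :
    pvConsHead x (pvModLast a m) = pvModLast a (pvConsHead x m) := by
  cases m with
  | nil => exact absurd rfl hm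
  | cons y ys =>
    cases ys with
    | nil => simp [pvModLast, pvConsHead]
    | cons z zs => simp [pvModLast, pvConsHead]

lemma pvSplit_snoc (c a : Char) (xs : List Char) :
    pvSplit c (xs ++ [a]) = if a = c then pvSplit c xs ++ [[]] else pvModLast a (pvSplit c xs) := by
  induction xs with
  | nil => by_cases hac : a = c <;> simp [pvSplit, hac, pvConsHead, pvModLast]
  | cons x t ih =>
    simp only [List.cons_append, pvSplit, ih]
    by_cases hxc : x = c
    · obtain ⟨y, ys, hy⟩ : ∃ y ys, pvSplit c t = y :: ys := by
        cases hh : pvSplit c t with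
        | nil => exact absurd hh (pvSplit_ne_nil c t)
        | cons y ys => exact ⟨_, _, rfl⟩
      by_cases hac : a = c <;> simp [hxc, hac, hy, pvModLast]
    · by_cases hac : a = c
      · simp only [hac, if_true, if_neg hxc]
        rw [pvConsHead_append_nil x _ (pvSplit_ne_nil c t)]
      · simp only [hac, if_false, if_neg hxc]
        rw [pvConsHead_modLast x a _ (pvSplit_ne_nil c t)]

lemma pvSplit_reverse (c : Char) (l : List Char) :
    pvSplit c l.reverse = (pvSplit c l).reverse.map List.reverse := by
  induction l with
  | nil => simp [pvSplit]
  | cons a t ih =>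
    simp only [List.reverse_cons]
    rw [pvSplit_snoc]
    by_cases hac : a = c
    · simp [hac, pvSplit, ih]
    · rw [if_neg hac, ih]
      simp only [pvSplit, if_neg hac]
      obtain ⟨x, xs, hx⟩ : ∃ x xs, pvSplit c t = x :: xs := by
        cases h : pvSplit c t with
        | nil => exact absurd h (pvSplit_ne_nil c t)
        | cons x xs => exact ⟨_, _, rfl⟩
      rw [hx]
      simp [pvConsHead, pvModLast_append]

-- pyGet? at the small constant indices the ports use
lemma pyGet?_zero {α : Type} (xs : List α) : PySem.List.pyGet? xs 0 = xs[0]? := by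
  unfold PySem.List.pyGet? PySem.List.pyIdx?
  by_cases h : (0:Int) < (xs.length : Int)
  · rw [if_pos (by omega), if_pos h]; rfl
  · rw [if_pos (by omega), if_neg h, List.getElem?_eq_none (by omega)]; rfl

lemma pyGet?_one {α : Type} (xs : List α) : PySem.List.pyGet? xs 1 = xs[1]? := by
  unfold PySem.List.pyGet? PySem.List.pyIdx?
  by_cases h : (1:Int) < (xs.length : Int)
  · rw [if_pos (by omega), if_pos h]; rfl
  · rw [if_pos (by omega), if_neg h, List.getElem?_eq_none (by omega)]; rfl

lemma pyGet?_neg_one {α : Type} (xs : List α) (h : 1 ≤ xs.length) :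
    PySem.List.pyGet? xs (-1) = xs[xs.length - 1]? := by
  unfold PySem.List.pyGet? PySem.List.pyIdx?
  rw [if_neg (by omega), if_pos (by omega)]
  rfl

lemma pyGet?_neg_two {α : Type} (xs : List α) (h : 2 ≤ xs.length) :
    PySem.List.pyGet? xs (-2) = xs[xs.length - 2]? := by
  unfold PySem.List.pyGet? PySem.List.pyIdx?
  rw [if_neg (by omega), if_pos (by omega)]
  rfl

lemma dropWhile_eq_drop (p : Char → Bool) (l : List Char) :
    l.dropWhile p = l.drop (l.takeWhile p).length := by
  induction l with
  | nil => rfl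
  | cons a t ih =>
    by_cases hp : p a
    · simp [hp, ih]
    · simp [hp]

lemma takeWhile_ne_length_lt (c : Char) (r : List Char) :
    c ∈ r → (r.takeWhile (fun x => x ≠ c)).length < r.length := by
  induction r with
  | nil => intro h; simp at h
  | cons a t ih =>
    intro h
    by_cases hac : a = c
    · simp [hac]
    · have hct : c ∈ t := by
        rcases List.mem_cons.mp h with h' | h'
        · exact absurd h'.symm hac
        · exact h'
      simp only [List.takeWhile_cons, decide_eq_true_eq]
      rw [if_pos hac]
      simp only [List.length_cons]
      have := ih hct
      omega

-- per-element values each port produces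
def pvAv (ele : String) : String :=
  String.ofList (((PySem.List.pyGet? (PySem.Chars.splitOn ele.toList [':']) 0).getD []).reverse)
def pvAc (ele : String) : String :=
  String.ofList (((PySem.List.pyGet? (PySem.Chars.splitOnMax ((PySem.List.pyGet? (PySem.Chars.splitOn ele.toList [':']) 1).getD []) [' '] 1) 0).getD []).reverse)
def pvAb (ele : String) : String :=
  String.ofList (((PySem.List.pyGet? (PySem.Chars.splitOnMax ((PySem.List.pyGet? (PySem.Chars.splitOn ele.toList [':']) 1).getD []) [' '] 1) 1).getD []).reverse)

def pvBt (ele : String) : String × String × String :=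
  let q := PySem.Chars.splitOn ele.toList [':']
  let verse := (PySem.List.pyGet? q (-1)).getD []
  let parts := pvRsplit1 ((PySem.List.pyGet? q (-2)).getD []) ' '
  (String.ofList ((PySem.List.pyGet? parts 0).getD []),
   String.ofList ((PySem.List.pyGet? parts 1).getD []),
   String.ofList verse)

lemma stepA_fold (L : List String) (v c b : List String) :
    L.foldl pvStepA (v, c, b) = (v ++ L.map pvAv, c ++ L.map pvAc, b ++ L.map pvAb) := by
  induction L generalizing v c b with
  | nil => simp
  | cons a t ih =>
    rw [List.foldl_cons, show pvStepA (v, c, b) a = (v ++ [pvAv a], c ++ [pvAc a], b ++ [pvAb a]) from rfl, ih]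
    simp

lemma stepB_fold (L : List String) (acc : List (String × String × String)) :
    L.foldl pvStepB acc = acc ++ L.map pvBt := by
  induction L generalizing acc with
  | nil => simp
  | cons a t ih =>
    rw [List.foldl_cons, show pvStepB acc a = acc ++ [pvBt a] from rfl, ih]
    simp

-- the heart: on a reference with a ':' and a ' ' before its last ':', A's reversed-string
-- extraction agrees with B's forward extraction
lemma elem_eq (s : String)
    (h1 : 2 ≤ (PySem.Chars.splitOn s.toList [':']).length)
    (h2 : ' ' ∈ (PySem.List.pyGet? (PySem.Chars.splitOn s.toList [':']) (-2)).getD []) :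
    (pvAb (String.ofList s.toList.reverse), pvAc (String.ofList s.toList.reverse),
      pvAv (String.ofList s.toList.reverse)) = pvBt s := by
  have hsq : PySem.Chars.splitOn s.toList [':'] = pvSplit ':' s.toList := splitOn_eq_pvSplit _ _
  set q := pvSplit ':' s.toList with hq
  have hn : 2 ≤ q.length := by rwa [hsq] at h1
  have ht1 : PySem.Chars.splitOn (String.ofList s.toList.reverse).toList [':']
      = q.reverse.map List.reverse := by
    rw [String.toList_ofList, splitOn_eq_pvSplit, pvSplit_reverse, hq]
  -- the three q-indexed pieces
  have hrev0 : q.reverse[0]? = q[q.length - 1]? := by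
    rw [List.getElem?_reverse (by omega)]
    simp
  have hrev1 : q.reverse[1]? = q[q.length - 2]? := by
    rw [List.getElem?_reverse (by omega)]
    congr 1
  obtain ⟨vl, hvl⟩ : ∃ vl, q[q.length - 1]? = some vl := ⟨_, List.getElem?_eq_getElem (by omega)⟩
  obtain ⟨w, hw⟩ : ∃ w, q[q.length - 2]? = some w := ⟨_, List.getElem?_eq_getElem (by omega)⟩
  have hwmem : ' ' ∈ w := by
    rw [hsq, pyGet?_neg_two q hn, hw] at h2
    exact h2
  -- A's verse piece
  have hA0 : (PySem.List.pyGet? (q.reverse.map List.reverse) 0).getD [] = vl.reverse := by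
    rw [pyGet?_zero, List.getElem?_map, hrev0, hvl]
    rfl
  -- A's chapter/book segment
  have hA1 : (PySem.List.pyGet? (q.reverse.map List.reverse) 1).getD [] = w.reverse := by
    rw [pyGet?_one, List.getElem?_map, hrev1, hw]
    rfl
  -- B's pieces
  have hB1 : (PySem.List.pyGet? q (-1)).getD [] = vl := by rw [pyGet?_neg_one q (by omega), hvl]; rfl
  have hB2 : (PySem.List.pyGet? q (-2)).getD [] = w := by rw [pyGet?_neg_two q hn, hw]; rfl
  -- the space split of the segment, both ways
  have hwr : ' ' ∈ w.reverse := by simpa using hwmem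
  have ha_lt : (w.reverse.takeWhile (fun x => x ≠ ' ')).length < w.reverse.length :=
    takeWhile_ne_length_lt ' ' w.reverse hwr
  have hparts : pvRsplit1 w ' '
      = [(w.reverse.drop ((w.reverse.takeWhile (fun x => x ≠ ' ')).length + 1)).reverse,
         (w.reverse.takeWhile (fun x => x ≠ ' ')).reverse] := by
    simp only [pvRsplit1]
    rw [if_neg (by omega)]
  have ht2 : PySem.Chars.splitOnMax w.reverse [' '] 1
      = [w.reverse.takeWhile (fun x => x ≠ ' '), (w.reverse.dropWhile (fun x => x ≠ ' ')).tail] := by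
    rw [splitOnMax_one_eq, pvFirstSplit, if_pos hwr]
    simp
  unfold pvAv pvAc pvAb
  simp only [pvBt]
  rw [ht1, hA1, hA0, ht2, hsq, hB1, hB2, hparts]
  rw [pyGet?_zero, pyGet?_one, pyGet?_zero, pyGet?_one]
  have hdw' : (List.dropWhile (fun x => !decide (x = ' ')) w.reverse).tail
      = List.drop ((List.takeWhile (fun x => !decide (x = ' ')) w.reverse).length + 1) w.reverse := by
    rw [dropWhile_eq_drop, List.tail_drop]
  simp [hdw']

-- ===== VERDICT (by name: the statement is the Claim_ definition above) =====
theorem GetVerseReferences_spec : Claim_equal_GetVerseReferences := by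
  intro L _hDom hPre
  unfold Spec_GetVerseReferences
  simp only [GetVerseReferences, GetVerseReferences_alt]
  rw [stepB_fold, stepA_fold]
  simp only [List.nil_append, List.map_map, Prod.mk.injEq]
  refine ⟨?_, ?_, ?_⟩ <;>
  · apply List.map_congr_left
    intro s hs
    obtain ⟨h1, h2⟩ := hPre s hs
    have h3 := elem_eq s h1 h2
    simp only [Function.comp_apply]
    rw [← h3]
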